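-- pv_equiv track=rewrite | github.com/UWPCE-PythonCert-ClassRepos/Self_Paced-Online | students/nDruP/lesson03/strformat_lab.py | format_num_string
-- ===== SOURCE A (Python) =====
-- def format_num_string(num_tuple):
--     """
--     Rewrite: "the 3 numbers are: {:d}, {:d}, {:d}".format(1,2,3)
--     to take an arbitrary number of values.
--     """
--     if num_tuple:
--         disp_string = "The "+str(len(num_tuple))+f" numbers are: "
--         for x in range(len(num_tuple)-1):
--             disp_string+="{:d}"+f"{',' if len(num_tuple)>2 else ''} "
--         disp_string+="and {:d}"
--         return disp_string.format(*num_tuple)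
--     return "There are no numbers given"
-- ===== SOURCE B (Python) =====
-- def format_num_string(num_tuple):
--     if not num_tuple:
--         return "There are no numbers given"
--     n = len(num_tuple)
--     parts = [format(x, 'd') for x in num_tuple]
--     sep = ', ' if n > 2 else ' '
--     body = ''.join(p + sep for p in parts[:-1]) + 'and ' + parts[-1]
--     return 'The ' + str(n) + ' numbers are: ' + body
-- ===== Notes on version B (the rewrite author's own statement) =====
-- stated objective: idiomatic
-- what changed: B formats each number once and joins the pieces directly, instead of building a '{:d}'-placeholder template in a loop and calling str.format on it.
import Mathlib
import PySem

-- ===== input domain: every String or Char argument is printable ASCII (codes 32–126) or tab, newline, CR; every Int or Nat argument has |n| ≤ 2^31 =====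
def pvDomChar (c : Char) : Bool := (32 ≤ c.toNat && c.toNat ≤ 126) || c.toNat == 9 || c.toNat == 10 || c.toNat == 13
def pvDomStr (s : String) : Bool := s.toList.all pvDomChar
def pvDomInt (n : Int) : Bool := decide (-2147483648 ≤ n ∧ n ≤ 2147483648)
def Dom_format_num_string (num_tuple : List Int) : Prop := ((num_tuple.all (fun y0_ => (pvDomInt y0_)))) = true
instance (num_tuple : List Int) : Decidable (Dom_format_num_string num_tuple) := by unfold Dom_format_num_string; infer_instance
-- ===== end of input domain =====

set_option maxRecDepth 8192


-- B builds the answer by formatting each number once and joining the pieces,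
-- instead of A's placeholder template built in a loop and filled by str.format;
-- same cost, more idiomatic.

-- ===== PORT A =====
-- hand port of str.format restricted to '{:d}' placeholders with int arguments,
-- replaced left to right: exact on A's templates, which contain no other brace constructs
def pyFormatD : List Char → List Int → List Char
  | '{' :: ':' :: 'd' :: '}' :: rest, a :: args => PySem.Int.toChars a ++ pyFormatD rest args
  | c :: rest, args => c :: pyFormatD rest args
  | [], _ => []

def format_num_string (num_tuple : List Int) : String :=
  if num_tuple ≠ [] then
    let n : Int := PySem.List.len num_tuple
    let d0 : String := "The " ++ PySem.Int.toStr n ++ " numbers are: "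
    let d1 : String := (PySem.List.pyRange 0 (n - 1) 1).foldl
        (fun acc _ => acc ++ "{:d}" ++ (if n > 2 then "," else "") ++ " ") d0
    String.ofList (pyFormatD (d1 ++ "and {:d}").toList num_tuple)
  else "There are no numbers given"

-- ===== PORT B =====
def format_num_string_alt (num_tuple : List Int) : String :=
  if num_tuple = [] then "There are no numbers given"
  else
    let n : Int := PySem.List.len num_tuple
    let parts : List String := num_tuple.map PySem.Int.toStr
    let sep : String := if n > 2 then ", " else " "
    let body : String :=
      PySem.Str.join "" ((parts.dropLast).map (fun p => p ++ sep))
        ++ "and " ++ ((PySem.List.pyGet? parts (-1)).getD "")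
    "The " ++ PySem.Int.toStr n ++ " numbers are: " ++ body

-- ===== PRECONDITION & SPEC =====
def Spec_format_num_string (num_tuple : List Int) (out : String) : Prop := out = format_num_string_alt num_tuple
instance (num_tuple : List Int) (out : String) : Decidable (Spec_format_num_string num_tuple out) := by unfold Spec_format_num_string; infer_instance

-- ===== CLAIM (what is proved, stated in full; the proofs are below) =====
def Claim_equal_format_num_string : Prop := ∀ (num_tuple : List Int), Dom_format_num_string num_tuple → Spec_format_num_string num_tuple (format_num_string num_tuple)

-- ===== LEMMAS AND PROOFS =====

theorem pyFormatD_nil (args : List Int) : pyFormatD [] args = [] := rfl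

theorem pyFormatD_plc (rest : List Char) (a : Int) (args : List Int) :
    pyFormatD ('{' :: ':' :: 'd' :: '}' :: rest) (a :: args)
      = PySem.Int.toChars a ++ pyFormatD rest args := rfl

theorem pyFormatD_cons (c : Char) (h : c ≠ '{') (t : List Char) (args : List Int) :
    pyFormatD (c :: t) args = c :: pyFormatD t args := by
  rw [pyFormatD.eq_def]
  split <;> simp_all

theorem pyFormatD_append_nb (pre : List Char) (h : ∀ c ∈ pre, c ≠ '{')
    (t : List Char) (args : List Int) :
    pyFormatD (pre ++ t) args = pre ++ pyFormatD t args := by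
  induction pre with
  | nil => simp
  | cons c cs ih =>
    have hc : c ≠ '{' := h c (by simp)
    rw [List.cons_append, pyFormatD_cons c hc, ih (fun x hx => h x (by simp [hx]))]
    rfl

theorem digitChar_ne_brace : ∀ m : Nat, Nat.digitChar m ≠ '{'
  | 0 => by decide
  | 1 => by decide
  | 2 => by decide
  | 3 => by decide
  | 4 => by decide
  | 5 => by decide
  | 6 => by decide
  | 7 => by decide
  | 8 => by decide
  | 9 => by decide
  | 10 => by decide
  | 11 => by decide
  | 12 => by decide
  | 13 => by decide
  | 14 => by decide
  | 15 => by decide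
  | (n + 16) => by
    unfold Nat.digitChar
    rw [if_neg (show ¬(n+16 = 0) by omega), if_neg (show ¬(n+16 = 1) by omega),
        if_neg (show ¬(n+16 = 2) by omega), if_neg (show ¬(n+16 = 3) by omega),
        if_neg (show ¬(n+16 = 4) by omega), if_neg (show ¬(n+16 = 5) by omega),
        if_neg (show ¬(n+16 = 6) by omega), if_neg (show ¬(n+16 = 7) by omega),
        if_neg (show ¬(n+16 = 8) by omega), if_neg (show ¬(n+16 = 9) by omega),
        if_neg (show ¬(n+16 = 10) by omega), if_neg (show ¬(n+16 = 11) by omega),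
        if_neg (show ¬(n+16 = 12) by omega), if_neg (show ¬(n+16 = 13) by omega),
        if_neg (show ¬(n+16 = 14) by omega), if_neg (show ¬(n+16 = 15) by omega)]
    decide

theorem toDigitsCore_nb : ∀ (fuel n : Nat) (acc : List Char),
    (∀ c ∈ acc, c ≠ '{') → ∀ c ∈ Nat.toDigitsCore 10 fuel n acc, c ≠ '{' := by
  intro fuel
  induction fuel with
  | zero => intro n acc hacc c hc; exact hacc c hc
  | succ f ih =>
    intro n acc hacc c hc
    rw [Nat.toDigitsCore] at hc
    have hstep : ∀ x ∈ Nat.digitChar (n % 10) :: acc, x ≠ '{' := by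
      intro x hx
      rcases List.mem_cons.mp hx with h' | h'
      · subst h'; exact digitChar_ne_brace _
      · exact hacc x h'
    by_cases h10 : n / 10 = 0
    · simp only [h10, if_pos] at hc
      exact hstep c hc
    · simp only [if_neg h10] at hc
      exact ih (n / 10) (Nat.digitChar (n % 10) :: acc) hstep c hc

theorem toChars_nb (n : Int) : ∀ c ∈ PySem.Int.toChars n, c ≠ '{' := by
  intro c hc
  unfold PySem.Int.toChars at hc
  split at hc
  · rcases List.mem_cons.mp hc with h' | h'
    · subst h'; decide
    · exact toDigitsCore_nb (n.natAbs + 1) n.natAbs [] (by simp) c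
        (by simpa [Nat.toDigits] using h')
  · exact toDigitsCore_nb (n.toNat + 1) n.toNat [] (by simp) c
      (by simpa [Nat.toDigits] using hc)

-- the shared body shape: "y<sep>…<sep>and z"
def bodyChars (sep : List Char) : List Int → Int → List Char
  | [], y => 'a' :: 'n' :: 'd' :: ' ' :: PySem.Int.toChars y
  | z :: zs, y => PySem.Int.toChars y ++ sep ++ bodyChars sep zs z

-- the template tail A's loop builds: k copies of "{:d}<sep>" then (appended later) "and {:d}"
def repBlk (sep : List Char) : Nat → List Char
  | 0 => []
  | k + 1 => '{' :: ':' :: 'd' :: '}' :: (sep ++ repBlk sep k)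

theorem formatD_repBlk (sep : List Char) (hsep : ∀ c ∈ sep, c ≠ '{') :
    ∀ (ys : List Int) (y : Int),
      pyFormatD (repBlk sep ys.length ++ ['a', 'n', 'd', ' ', '{', ':', 'd', '}']) (y :: ys)
        = bodyChars sep ys y := by
  intro ys
  induction ys with
  | nil =>
    intro y
    simp only [List.length_nil, repBlk, List.nil_append]
    rw [show (['a', 'n', 'd', ' ', '{', ':', 'd', '}'] : List Char)
          = ['a','n','d',' '] ++ ('{' :: ':' :: 'd' :: '}' :: []) from rfl]
    rw [pyFormatD_append_nb ['a','n','d',' '] (by simp)]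
    rw [pyFormatD_plc, pyFormatD_nil]
    simp [bodyChars]
  | cons z zs ih =>
    intro y
    simp only [List.length_cons, repBlk, bodyChars]
    rw [List.cons_append, List.cons_append, List.cons_append, List.cons_append,
        List.append_assoc]
    rw [pyFormatD_plc]
    rw [pyFormatD_append_nb sep hsep]
    rw [ih z]
    simp [List.append_assoc]

theorem join_bodyChars (sep : List Char) :
    ∀ (ys : List Int) (y : Int),
      PySem.Chars.join [] ((((y :: ys).map PySem.Int.toChars).dropLast).map (fun p => p ++ sep))
          ++ ['a', 'n', 'd', ' '] ++ (((y :: ys).map PySem.Int.toChars).getLast?.getD [])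
        = bodyChars sep ys y := by
  intro ys
  induction ys with
  | nil =>
    intro y
    simp [PySem.Chars.join_nil, bodyChars]
  | cons z zs ih =>
    intro y
    cases zs with
    | nil =>
      simp [bodyChars, PySem.Chars.join_singleton, List.append_assoc]
    | cons w ws =>
      have ihz := ih z
      simp only [List.map_cons] at ihz ⊢
      rw [List.dropLast_cons₂, List.map_cons, List.getLast?_cons_cons] at ihz
      rw [List.dropLast_cons₂, List.map_cons, List.getLast?_cons_cons,
          List.dropLast_cons₂, List.map_cons, List.getLast?_cons_cons,
          PySem.Chars.join_cons_cons]
      rw [show (bodyChars sep (z :: w :: ws) y)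
            = PySem.Int.toChars y ++ sep ++ bodyChars sep (w :: ws) z from rfl]
      rw [← ihz]
      simp [List.append_assoc]

theorem fold_template_str (b : String) :
    ∀ (l : List Int) (init : String),
      (l.foldl (fun acc _ => acc ++ b) init).toList
        = init.toList ++ (List.replicate l.length b.toList).flatten := by
  intro l
  induction l with
  | nil => intro init; simp
  | cons x xs ih =>
    intro init
    simp only [List.foldl_cons, ih, List.length_cons, List.replicate_succ, List.flatten_cons]
    simp [List.append_assoc]

theorem replicate_repBlk (sep : List Char) :
    ∀ k : Nat, (List.replicate k ('{' :: ':' :: 'd' :: '}' :: sep)).flatten = repBlk sep k := by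
  intro k
  induction k with
  | zero => rfl
  | succ m ih => simp [List.replicate_succ, repBlk, ih]

def sepC (n : Int) : List Char := if n > 2 then [',', ' '] else [' ']

theorem A_chars_aux (n : Int) (y : Int) (ys : List Int) (B : String) (sep : List Char)
    (hB : B.toList = '{' :: ':' :: 'd' :: '}' :: sep) (hsep : ∀ c ∈ sep, c ≠ '{')
    (hlen : (PySem.List.pyRange 0 (n - 1) 1).length = ys.length) :
    (String.ofList (pyFormatD
        ((((PySem.List.pyRange 0 (n - 1) 1).foldl (fun acc (_ : Int) => acc ++ B)
            ("The " ++ PySem.Int.toStr n ++ " numbers are: ")) ++ "and {:d}").toList)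
        (y :: ys))).toList
      = "The ".toList ++ PySem.Int.toChars n ++ " numbers are: ".toList
        ++ bodyChars sep ys y := by
  rw [String.toList_ofList, String.toList_append, fold_template_str B _ _, hlen, hB,
      replicate_repBlk sep ys.length]
  rw [show ("and {:d}" : String).toList = ['a', 'n', 'd', ' ', '{', ':', 'd', '}'] from by decide]
  simp only [String.toList_append, PySem.Int.toList_toStr]
  rw [show ("The " : String).toList = ['T','h','e',' '] from by decide,
      show (" numbers are: " : String).toList
        = [' ','n','u','m','b','e','r','s',' ','a','r','e',':',' '] from by decide]
  rw [List.append_assoc (['T','h','e',' '] ++ PySem.Int.toChars n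
        ++ [' ','n','u','m','b','e','r','s',' ','a','r','e',':',' '])]
  rw [pyFormatD_append_nb (['T','h','e',' '] ++ PySem.Int.toChars n
        ++ [' ','n','u','m','b','e','r','s',' ','a','r','e',':',' '])
      (by
        intro c hc
        rcases List.mem_append.mp hc with h' | h'
        · rcases List.mem_append.mp h' with h'' | h''
          · exact (by simp : ∀ c ∈ ['T','h','e',' '], c ≠ '{') c h''
          · exact toChars_nb n c h''
        · exact (by simp :
              ∀ c ∈ [' ','n','u','m','b','e','r','s',' ','a','r','e',':',' '], c ≠ '{') c h')]
  rw [formatD_repBlk sep hsep ys y]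

theorem A_chars (y : Int) (ys : List Int) :
    (format_num_string (y :: ys)).toList
      = "The ".toList ++ PySem.Int.toChars (((y :: ys).length : Int))
        ++ " numbers are: ".toList ++ bodyChars (sepC (((y :: ys).length : Int))) ys y := by
  unfold format_num_string
  rw [if_pos (show (y :: ys : List Int) ≠ [] by simp)]
  simp only [PySem.List.len_eq]
  have hlen : (PySem.List.pyRange 0 ((((y :: ys).length : Nat) : Int) - 1) 1).length
      = ys.length := by
    rw [PySem.List.length_pyRange_one]
    simp
  by_cases hc : (((y :: ys).length : Nat) : Int) > 2
  · simp only [if_pos hc]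
    have hfun : (fun (acc : String) (_ : Int) => acc ++ "{:d}" ++ "," ++ " ")
        = fun (acc : String) (_ : Int) => acc ++ "{:d}, " := by
      funext acc _
      rw [String.append_assoc, String.append_assoc]
      congr 1
    rw [hfun, A_chars_aux _ y ys "{:d}, " [',', ' '] (by decide) (by simp) hlen]
    rw [show sepC (((y :: ys).length : Nat) : Int) = [',', ' '] from by unfold sepC; rw [if_pos hc]]
  · simp only [if_neg hc]
    have hfun : (fun (acc : String) (_ : Int) => acc ++ "{:d}" ++ "" ++ " ")
        = fun (acc : String) (_ : Int) => acc ++ "{:d} " := by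
      funext acc _
      rw [String.append_assoc, String.append_assoc]
      congr 1
    rw [hfun, A_chars_aux _ y ys "{:d} " [' '] (by decide) (by simp) hlen]
    rw [show sepC (((y :: ys).length : Nat) : Int) = [' '] from by unfold sepC; rw [if_neg hc]]

theorem B_chars_aux (n : Int) (y : Int) (ys : List Int) (S : String) (sep : List Char)
    (hS : S.toList = sep) :
    ("The " ++ PySem.Int.toStr n ++ " numbers are: "
      ++ (PySem.Str.join "" ((((y :: ys).map PySem.Int.toStr).dropLast).map (fun p => p ++ S))
          ++ "and " ++ ((PySem.List.pyGet? ((y :: ys).map PySem.Int.toStr) (-1)).getD ""))).toList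
    = "The ".toList ++ PySem.Int.toChars n ++ " numbers are: ".toList ++ bodyChars sep ys y := by
  simp only [String.toList_append, PySem.Str.toList_join, PySem.Int.toList_toStr,
    PySem.List.pyGet?_neg_one]
  have hmap : List.map String.toList
        (List.map (fun p : String => p ++ S) (((y :: ys).map PySem.Int.toStr).dropLast))
      = List.map (fun p => p ++ sep) (((y :: ys).map PySem.Int.toChars).dropLast) := by
    rw [List.map_map, ← List.map_dropLast, ← List.map_dropLast, List.map_map, List.map_map]
    congr 1
    funext a
    show ((PySem.Int.toStr a) ++ S).toList = PySem.Int.toChars a ++ sep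
    rw [String.toList_append, hS, PySem.Int.toList_toStr]
  rw [hmap]
  have hlast : (((y :: ys).map PySem.Int.toStr).getLast?.getD "").toList
      = ((y :: ys).map PySem.Int.toChars).getLast?.getD [] := by
    rw [List.getLast?_map, List.getLast?_map]
    cases (y :: ys).getLast? with
    | none => rfl
    | some v => simp [PySem.Int.toList_toStr]
  rw [hlast]
  rw [show ("and " : String).toList = ['a', 'n', 'd', ' '] from by decide,
      show ("" : String).toList = ([] : List Char) from rfl]
  rw [join_bodyChars sep ys y]

theorem B_chars (y : Int) (ys : List Int) :
    (format_num_string_alt (y :: ys)).toList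
      = "The ".toList ++ PySem.Int.toChars (((y :: ys).length : Int))
        ++ " numbers are: ".toList ++ bodyChars (sepC (((y :: ys).length : Int))) ys y := by
  unfold format_num_string_alt
  rw [if_neg (show ¬(y :: ys : List Int) = [] by simp)]
  simp only [PySem.List.len_eq]
  by_cases hc : (((y :: ys).length : Nat) : Int) > 2
  · simp only [if_pos hc]
    rw [B_chars_aux _ y ys ", " [',', ' '] (by decide)]
    rw [show sepC (((y :: ys).length : Nat) : Int) = [',', ' '] from by unfold sepC; rw [if_pos hc]]
  · simp only [if_neg hc]
    rw [B_chars_aux _ y ys " " [' '] (by decide)]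
    rw [show sepC (((y :: ys).length : Nat) : Int) = [' '] from by unfold sepC; rw [if_neg hc]]

-- ===== VERDICT (by name: the statement is the Claim_ definition above) =====
theorem format_num_string_spec : Claim_equal_format_num_string := by
  intro xs _
  unfold Spec_format_num_string
  cases xs with
  | nil => rfl
  | cons y ys =>
    exact String.toList_inj.mp ((A_chars y ys).trans (B_chars y ys).symm)
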